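-- pv_equiv track=rewrite | github.com/SuadoCowboy/SuadoScript | plugins/example.py | create_square
-- ===== SOURCE A (Python) =====
-- def create_square(width: int, height: int, char: str):
--     out = ''
--     width = int(width)
--     height = int(height)
--     for y in range(height):
--         for x in range(width):
--             out += char
--             if x == width-1 and y != height-1:
--                 out += '\n'
--     return out
-- ===== SOURCE B (Python) =====
-- def create_square(width: int, height: int, char: str):
--     width = int(width)
--     height = int(height)
--     if width <= 0 or height <= 0:
--         return ''
--     return '\n'.join([char * width] * height)
-- ===== Notes on version B (the rewrite author's own statement) =====
-- stated objective: simpler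
-- what changed: Replaces the nested per-character loop with the branch inside it by building one row string char*width, replicating it height times and joining with '\n' (empty result guarded up front for non-positive width or height).
import Mathlib
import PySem

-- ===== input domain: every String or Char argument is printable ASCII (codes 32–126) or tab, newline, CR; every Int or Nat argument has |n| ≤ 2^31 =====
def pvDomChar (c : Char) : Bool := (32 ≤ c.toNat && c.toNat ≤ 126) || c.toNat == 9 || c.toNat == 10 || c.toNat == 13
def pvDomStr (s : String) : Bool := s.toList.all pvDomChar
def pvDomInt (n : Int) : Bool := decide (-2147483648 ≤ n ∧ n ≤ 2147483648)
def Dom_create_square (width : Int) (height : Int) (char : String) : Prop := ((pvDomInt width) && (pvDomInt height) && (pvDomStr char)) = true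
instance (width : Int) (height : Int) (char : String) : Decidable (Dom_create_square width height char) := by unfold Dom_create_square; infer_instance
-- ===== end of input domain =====

-- B replaces A's nested per-character loop by one row char*width replicated height
-- times and joined with '\n' (objective: simpler).

-- ===== PORT A =====
-- nested for-loops over range(height)/range(width), appending char and a
-- conditional newline to the accumulator string (kept as List Char)
def create_square (width : Int) (height : Int) (char : String) : String :=
  String.ofList <|
    (PySem.List.pyRange 0 height 1).foldl (fun out y =>
      (PySem.List.pyRange 0 width 1).foldl (fun out x =>
        if x = width - 1 ∧ y ≠ height - 1 then
          (out ++ char.toList) ++ ['\n']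
        else
          out ++ char.toList) out) []

-- ===== PORT B =====
def create_square_alt (width : Int) (height : Int) (char : String) : String :=
  if width ≤ 0 ∨ height ≤ 0 then ""
  else
    String.ofList <|
      PySem.Chars.join ['\n']
        (List.replicate height.toNat (PySem.List.pyRepeat char.toList width))

-- ===== PRECONDITION & SPEC =====
def Spec_create_square (width : Int) (height : Int) (char : String) (out : String) : Prop := out = create_square_alt width height char
instance (width : Int) (height : Int) (char : String) (out : String) : Decidable (Spec_create_square width height char out) := by unfold Spec_create_square; infer_instance

-- ===== CLAIM (what is proved, stated in full; the proofs are below) =====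
def Claim_equal_create_square : Prop := ∀ (width : Int) (height : Int) (char : String), Dom_create_square width height char → Spec_create_square width height char (create_square width height char)

-- ===== LEMMAS AND PROOFS =====

-- flatMap of a constant list over any list is flatten of replicate
theorem flatMap_const_chars (l : List Int) (cs : List Char) :
    l.flatMap (fun _ => cs) = (List.replicate l.length cs).flatten := by
  induction l with
  | nil => simp
  | cons x xs ih => simp [List.flatMap_cons, ih, List.replicate_succ]

-- A's inner loop: appends char*width, plus a trailing newline iff the row is
-- nonempty and the condition p (y ≠ height-1) holds
theorem inner_loop_eq (w : Int) (cs acc : List Char) (p : Prop) [Decidable p] :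
    (PySem.List.pyRange 0 w 1).foldl
      (fun out x => if x = w - 1 ∧ p then (out ++ cs) ++ ['\n'] else out ++ cs) acc
    = acc ++ PySem.List.pyRepeat cs w ++ (if 0 < w ∧ p then ['\n'] else []) := by
  rcases (by omega : w ≤ 0 ∨ 0 < w) with hw | hw
  · have h0 : ¬ (0 < w ∧ p) := fun h => absurd h.1 (not_lt.mpr hw)
    rw [PySem.List.pyRange_one_eq_nil hw]
    simp [PySem.List.pyRepeat, Int.toNat_of_nonpos hw, h0]
  · have hone : PySem.List.pyRange (w - 1) w 1 = [w - 1] := by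
      have h := PySem.List.pyRange_one_singleton (w - 1)
      rw [show w - 1 + 1 = w from by omega] at h
      exact h
    have hsplit : PySem.List.pyRange 0 w 1
        = PySem.List.pyRange 0 (w - 1) 1 ++ [w - 1] := by
      rw [PySem.List.pyRange_one_append 0 (w - 1) w (by omega) (by omega), hone]
    have hcongr : (PySem.List.pyRange 0 (w - 1) 1).foldl
        (fun out x => if x = w - 1 ∧ p then (out ++ cs) ++ ['\n'] else out ++ cs) acc
        = (PySem.List.pyRange 0 (w - 1) 1).foldl (fun out _ => out ++ cs) acc := by
      apply PySem.List.foldl_congr_mem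
      intro a x hx
      have hx' := PySem.List.mem_pyRange_one.mp hx
      have hne : ¬ (x = w - 1 ∧ p) := fun h => by omega
      simp [hne]
    have hpre : (PySem.List.pyRange 0 (w - 1) 1).foldl (fun out _ => out ++ cs) acc
        = acc ++ (List.replicate (w - 1 - 0).toNat cs).flatten := by
      rw [PySem.List.foldl_append_eq_flatMap (fun _ => cs),
        flatMap_const_chars, PySem.List.length_pyRange_one]
    have hrep : ((List.replicate (w - 1 - 0).toNat cs).flatten) ++ cs
        = PySem.List.pyRepeat cs w := by
      have hw' : w.toNat = (w - 1 - 0).toNat + 1 := by omega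
      rw [PySem.List.pyRepeat, hw', List.replicate_succ', List.flatten_append]
      simp
    rw [hsplit, List.foldl_append, hcongr, hpre]
    by_cases hp : p
    · rw [List.foldl_cons, List.foldl_nil,
        if_pos (show w - 1 = w - 1 ∧ p from ⟨rfl, hp⟩),
        if_pos (show 0 < w ∧ p from ⟨hw, hp⟩), List.append_assoc, ← hrep]
      simp
    · rw [List.foldl_cons, List.foldl_nil,
        if_neg (show ¬ (w - 1 = w - 1 ∧ p) from fun h => hp h.2),
        if_neg (show ¬ (0 < w ∧ p) from fun h => hp h.2), List.append_assoc, ← hrep]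
      simp

-- a fold that ignores its elements is the identity
theorem foldl_id_chars (l : List Int) (init : List Char) :
    l.foldl (fun acc _ => acc) init = init := by
  induction l generalizing init with
  | nil => rfl
  | cons x xs ih => exact ih init

-- '\n'.join of n+1 copies of a row = n copies of (row ++ '\n') then the row
theorem join_replicate (n : Nat) (r : List Char) :
    PySem.Chars.join ['\n'] (List.replicate (n + 1) r)
      = (List.replicate n (r ++ ['\n'])).flatten ++ r := by
  induction n with
  | zero => simp [PySem.Chars.join_singleton]
  | succ m ih =>
    have h2 : List.replicate (m + 1 + 1) r = r :: (r :: List.replicate m r) := by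
      simp [List.replicate_succ]
    have h1 : r :: List.replicate m r = List.replicate (m + 1) r :=
      (List.replicate_succ (a := r) (n := m)).symm
    rw [h2, PySem.Chars.join_cons_cons, h1, ih, List.replicate_succ, List.flatten_cons]
    simp

-- ===== VERDICT (by name: the statement is the Claim_ definition above) =====
theorem create_square_spec : Claim_equal_create_square := by
  intro width height char _
  show create_square width height char = create_square_alt width height char
  unfold create_square create_square_alt
  rcases (by omega : width ≤ 0 ∨ 0 < width) with hw | hw
  · -- width ≤ 0: every inner loop runs zero times, A builds ""
    rw [if_pos (Or.inl hw)]
    have hA : (PySem.List.pyRange 0 height 1).foldl (fun out y =>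
        (PySem.List.pyRange 0 width 1).foldl
          (fun out x => if x = width - 1 ∧ y ≠ height - 1 then (out ++ char.toList) ++ ['\n']
            else out ++ char.toList) out) ([] : List Char) = [] := by
      rw [PySem.List.foldl_congr_mem _ _ (fun out _ => out) _ (by
        intro acc y _
        rw [inner_loop_eq]
        have h0 : ¬ (0 < width ∧ y ≠ height - 1) := fun h => absurd h.1 (not_lt.mpr hw)
        simp [PySem.List.pyRepeat, Int.toNat_of_nonpos hw, h0])]
      exact foldl_id_chars _ _
    rw [hA]
  · rcases (by omega : height ≤ 0 ∨ 0 < height) with hh | hh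
    · -- height ≤ 0: the outer loop runs zero times
      rw [if_pos (Or.inr hh), PySem.List.pyRange_one_eq_nil hh]
      rfl
    · -- width > 0, height > 0
      rw [if_neg (by omega)]
      have hone : PySem.List.pyRange (height - 1) height 1 = [height - 1] := by
        have h := PySem.List.pyRange_one_singleton (height - 1)
        rw [show height - 1 + 1 = height from by omega] at h
        exact h
      have hsplit : PySem.List.pyRange 0 height 1
          = PySem.List.pyRange 0 (height - 1) 1 ++ [height - 1] := by
        rw [PySem.List.pyRange_one_append 0 (height - 1) height (by omega) (by omega), hone]
      have hpre : (PySem.List.pyRange 0 (height - 1) 1).foldl (fun out y =>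
          (PySem.List.pyRange 0 width 1).foldl
            (fun out x => if x = width - 1 ∧ y ≠ height - 1 then (out ++ char.toList) ++ ['\n']
              else out ++ char.toList) out) ([] : List Char)
          = (List.replicate (height - 1 - 0).toNat
              (PySem.List.pyRepeat char.toList width ++ ['\n'])).flatten := by
        rw [PySem.List.foldl_congr_mem _ _
          (fun out _ => out ++ (PySem.List.pyRepeat char.toList width ++ ['\n'])) _ (by
            intro acc y hy
            have hy' := PySem.List.mem_pyRange_one.mp hy
            rw [inner_loop_eq]
            have hyp : 0 < width ∧ y ≠ height - 1 := ⟨hw, by omega⟩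
            rw [if_pos hyp, List.append_assoc])]
        rw [PySem.List.foldl_append_eq_flatMap
          (fun _ => PySem.List.pyRepeat char.toList width ++ ['\n']),
          flatMap_const_chars, PySem.List.length_pyRange_one]
        rfl
      rw [hsplit, List.foldl_append, List.foldl_cons, List.foldl_nil, inner_loop_eq, hpre]
      have hnp : ¬ (0 < width ∧ (height - 1 : Int) ≠ height - 1) := fun h => h.2 rfl
      rw [if_neg hnp]
      have hh' : height.toNat = (height - 1 - 0).toNat + 1 := by omega
      rw [hh', join_replicate]
      simp
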